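-- pv_equiv track=rewrite | github.com/opensafely/tpp-code-counts | reporting/generate_consolidated_reports.py | calculate_usage_scenarios
-- ===== SOURCE A (Python) =====
-- def calculate_usage_scenarios(usage_totals, codelist_codes):
--     """Calculate three usage scenarios for a codelist.
--
--     Args:
--         usage_totals: dict of {code: {"primary_24_25": int, "primary_total": int, "all_total": int}} from code_usage_combined_apcs.csv
--         codelist_codes: list of codes in the codelist
--
--     Returns:
--         tuple: (exact_match, with_prefix, with_x_padding) - event counts for each scenario using primary_24_25 data
--     """
--     if not codelist_codes:
--         return 0, 0, 0
--
--     # Scenario (a): Exact code matches only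
--     exact_match = sum(
--         usage_totals.get(code, {}).get("primary_24_25", 0) for code in codelist_codes
--     )
--
--     # Scenario (b): With prefix matching - any code starting with a codelist code
--     with_prefix = 0
--     counted_codes = set()
--     for codelist_code in codelist_codes:
--         for usage_code, usage_data in usage_totals.items():
--             if usage_code.startswith(codelist_code) and usage_code not in counted_codes:
--                 with_prefix += usage_data.get("primary_24_25", 0)
--                 counted_codes.add(usage_code)
--
--     # Scenario (c): With X-padding - exact codes + codes with X suffix
--     with_x_padding = exact_match
--     for codelist_code in codelist_codes:
--         # Add the X-padded version if it exists
--         x_code = (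
--             codelist_code + "X" if not codelist_code.endswith("X") else codelist_code
--         )
--         if x_code in usage_totals:
--             with_x_padding += usage_totals[x_code].get("primary_24_25", 0)
--
--     return exact_match, with_prefix, with_x_padding
-- ===== SOURCE B (Python) =====
-- def calculate_usage_scenarios(usage_totals, codelist_codes):
--     if not codelist_codes:
--         return 0, 0, 0
--
--     # Build the per-code count index once.
--     counts = {code: data.get("primary_24_25", 0) for code, data in usage_totals.items()}
--
--     # Scenario (a): exact matches, one O(1) lookup per codelist code.
--     exact_match = sum(counts.get(code, 0) for code in codelist_codes)
--
--     # Scenario (b): one pass over usage codes; a usage code matches iff one of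
--     # its own prefixes is in the codelist set (O(U*L) instead of O(C*U)).
--     prefix_set = set(codelist_codes)
--     with_prefix = 0
--     for usage_code, n in counts.items():
--         if any(usage_code[:i] in prefix_set for i in range(len(usage_code) + 1)):
--             with_prefix += n
--
--     # Scenario (c): exact matches plus the X-padded lookups.
--     with_x_padding = exact_match
--     for code in codelist_codes:
--         x_code = code if code.endswith("X") else code + "X"
--         if x_code in counts:
--             with_x_padding += counts[x_code]
--
--     return exact_match, with_prefix, with_x_padding
-- ===== Notes on version B (the rewrite author's own statement) =====
-- stated objective: faster
-- what changed: B builds a code->count dict once and replaces A's C*U nested prefix scan (with a counted-codes set) by a single pass over usage codes that tests each code's own prefixes against a set of the codelist codes.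
import Mathlib
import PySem

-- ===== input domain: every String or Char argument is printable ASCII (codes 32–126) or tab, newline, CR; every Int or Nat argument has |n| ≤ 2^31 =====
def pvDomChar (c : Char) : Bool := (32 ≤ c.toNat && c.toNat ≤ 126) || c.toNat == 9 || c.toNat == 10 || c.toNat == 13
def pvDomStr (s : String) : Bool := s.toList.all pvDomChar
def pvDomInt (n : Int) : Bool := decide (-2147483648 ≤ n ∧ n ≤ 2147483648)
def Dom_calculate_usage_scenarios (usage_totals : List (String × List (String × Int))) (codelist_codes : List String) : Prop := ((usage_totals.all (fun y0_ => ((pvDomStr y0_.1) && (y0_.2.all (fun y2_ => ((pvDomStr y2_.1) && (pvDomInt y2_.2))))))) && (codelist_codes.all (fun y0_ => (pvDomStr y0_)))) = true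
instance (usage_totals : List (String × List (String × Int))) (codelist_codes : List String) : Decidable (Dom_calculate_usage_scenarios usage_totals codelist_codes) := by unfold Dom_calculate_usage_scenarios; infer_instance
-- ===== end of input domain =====

-- B replaces A's O(C*U) prefix scan by one pass over the usage codes against a codelist set
-- (objective: faster). Return-value equivalence only; neither program mutates its arguments.

-- shared helper: `d.get("primary_24_25", 0)` on an inner dict given as its item list (exact: Dict.getD)
def pv_primary (d : List (String × Int)) : Int :=
  PySem.Dict.getD (PySem.Dict.mk d) "primary_24_25" 0

-- shared helper: `code + "X"` — string concatenation on code points (exact for str + str)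
def pvAddX (c : String) : String := String.ofList (c.toList ++ ['X'])

-- ===== PORT A =====
def calculate_usage_scenarios (usage_totals : List (String × List (String × Int))) (codelist_codes : List String) : Int × Int × Int :=
  if codelist_codes = [] then (0, 0, 0)
  else
    let ud : PySem.Dict String (List (String × Int)) := PySem.Dict.mk usage_totals
    -- exact_match = sum(usage_totals.get(code, {}).get("primary_24_25", 0) for code in codelist_codes)
    let exact_match : Int := (codelist_codes.map (fun code => pv_primary ((ud.get? code).getD []))).sum
    -- with_prefix loop, state = (with_prefix, counted_codes)
    let st := codelist_codes.foldl (fun st codelist_code =>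
        ud.items.foldl (fun st p =>
          if PySem.Str.startswith p.1 codelist_code && !(PySem.Set.contains st.2 p.1) then
            (st.1 + pv_primary p.2, PySem.Set.add st.2 p.1)
          else st) st)
      ((0 : Int), (PySem.Set.empty : PySem.Set String))
    let with_prefix := st.1
    -- with_x_padding loop
    let with_x_padding := codelist_codes.foldl (fun acc codelist_code =>
        let x_code := if !(PySem.Str.endswith codelist_code "X") then pvAddX codelist_code else codelist_code
        if ud.contains x_code then acc + pv_primary ((ud.get? x_code).getD []) else acc)
      exact_match
    (exact_match, with_prefix, with_x_padding)

-- ===== PORT B =====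
def calculate_usage_scenarios_alt (usage_totals : List (String × List (String × Int))) (codelist_codes : List String) : Int × Int × Int :=
  if codelist_codes = [] then (0, 0, 0)
  else
    -- counts = {code: data.get("primary_24_25", 0) for code, data in usage_totals.items()}
    let counts : PySem.Dict String Int :=
      usage_totals.foldl (fun d p => d.insert p.1 (pv_primary p.2)) PySem.Dict.empty
    let exact_match : Int := (codelist_codes.map (fun c => counts.getD c 0)).sum
    let prefix_set : PySem.Set String := PySem.Set.ofList codelist_codes
    let with_prefix : Int := counts.items.foldl (fun acc p =>
        if (PySem.List.pyRange 0 (PySem.Str.len p.1 + 1) 1).any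
             (fun i => PySem.Set.contains prefix_set (PySem.Str.slice p.1 none (some i)))
        then acc + p.2 else acc) (0 : Int)
    let with_x_padding : Int := codelist_codes.foldl (fun acc c =>
        let x_code := if PySem.Str.endswith c "X" then c else pvAddX c
        if counts.contains x_code then acc + counts.getD x_code 0 else acc)
      exact_match
    (exact_match, with_prefix, with_x_padding)

-- ===== PRECONDITION & SPEC =====
-- usage_totals and its inner tables are Python dicts: association lists with duplicate keys do
-- not correspond to any dict input, so Pre_ requires distinct keys at both levels.
def Pre_calculate_usage_scenarios (usage_totals : List (String × List (String × Int))) (codelist_codes : List String) : Prop :=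
  (usage_totals.map Prod.fst).Nodup ∧ ∀ p ∈ usage_totals, (p.2.map Prod.fst).Nodup
instance (usage_totals : List (String × List (String × Int))) (codelist_codes : List String) : Decidable (Pre_calculate_usage_scenarios usage_totals codelist_codes) := by unfold Pre_calculate_usage_scenarios; infer_instance

def pvWitness_calculate_usage_scenarios : (List (String × List (String × Int))) × List String :=
  ([("A1", [("primary_24_25", 3), ("all_total", 9)]), ("A1X", [("primary_24_25", 2)])], ["A1", "B2"])

def Spec_calculate_usage_scenarios (usage_totals : List (String × List (String × Int))) (codelist_codes : List String) (out : Int × Int × Int) : Prop := out = calculate_usage_scenarios_alt usage_totals codelist_codes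
instance (usage_totals : List (String × List (String × Int))) (codelist_codes : List String) (out : Int × Int × Int) : Decidable (Spec_calculate_usage_scenarios usage_totals codelist_codes out) := by unfold Spec_calculate_usage_scenarios; infer_instance

-- ===== CLAIM (what is proved, stated in full; the proofs are below) =====
def Claim_equal_calculate_usage_scenarios : Prop := ∀ (usage_totals : List (String × List (String × Int))) (codelist_codes : List String), Dom_calculate_usage_scenarios usage_totals codelist_codes → Pre_calculate_usage_scenarios usage_totals codelist_codes → Spec_calculate_usage_scenarios usage_totals codelist_codes (calculate_usage_scenarios usage_totals codelist_codes)

-- ===== LEMMAS AND PROOFS =====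

-- "some codelist code is a prefix of u"
def pvHasPrefix (cs : List String) (u : String) : Bool := cs.any (fun c => PySem.Str.startswith u c)

-- B's prefix test (scan over u's own prefixes against the codelist set) equals pvHasPrefix
lemma anyPrefix_eq (cs : List String) (u : String) :
    ((PySem.List.pyRange 0 (PySem.Str.len u + 1) 1).any
      (fun i => PySem.Set.contains (PySem.Set.ofList cs) (PySem.Str.slice u none (some i))))
    = pvHasPrefix cs u := by
  have hlen : PySem.Str.len u = (u.toList.length : Int) := by
    simp [PySem.Str.len]
  rw [Bool.eq_iff_iff]
  simp only [pvHasPrefix, List.any_eq_true, PySem.List.mem_pyRange_one,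
    PySem.Set.contains_iff, PySem.Set.mem_ofList]
  constructor
  · rintro ⟨i, ⟨h0, hi⟩, hmem⟩
    refine ⟨_, hmem, ?_⟩
    rw [PySem.Str.startswith_eq, PySem.Chars.startswith_iff, PySem.Str.toList_slice,
      PySem.Chars.slice_eq_listSlice, PySem.List.slice_to _ h0]
    exact List.take_prefix _ _
  · rintro ⟨c, hc, hsw⟩
    rw [PySem.Str.startswith_eq, PySem.Chars.startswith_iff] at hsw
    refine ⟨(c.toList.length : Int), ⟨by positivity, ?_⟩, ?_⟩
    · rw [hlen]
      have := hsw.length_le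
      omega
    · have : (PySem.Str.slice u none (some (c.toList.length : Int))) = c := by
        rw [← String.toList_inj, PySem.Str.toList_slice, PySem.Chars.slice_eq_listSlice,
          PySem.List.slice_to_natCast]
        exact (List.prefix_iff_eq_take.mp hsw).symm
      rw [this]; exact hc

-- the counts dict built by B has items = usage_totals mapped through pv_primary (needs Nodup keys)
lemma counts_items (U : List (String × List (String × Int)))
    (hnd : (U.map Prod.fst).Nodup) :
    (U.foldl (fun d p => d.insert p.1 (pv_primary p.2)) PySem.Dict.empty).items
      = U.map (fun p => (p.1, pv_primary p.2)) := by
  have := PySem.Dict.items_foldl_insert_fresh (ν := Int) U Prod.fst (fun p => pv_primary p.2)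
    PySem.Dict.empty (by intro a _; rfl) hnd
  simpa using this

-- lookup in a key-preserving mapped dict
lemma get?_mk_map (U : List (String × List (String × Int))) (c : String) :
    (PySem.Dict.mk (U.map (fun p => (p.1, pv_primary p.2)))).get? c
      = ((PySem.Dict.mk U).get? c).map pv_primary := by
  induction U with
  | nil => rfl
  | cons p rest ih =>
    obtain ⟨k, v⟩ := p
    simp only [List.map_cons, PySem.Dict.get?_mk_cons]
    split_ifs <;> simp [ih]

-- keys counted into A's `counted_codes` set by one inner pass
lemma innerA_mem (c : String) (U : List (String × List (String × Int)))
    (acc : Int) (S : PySem.Set String) (x : String) :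
    x ∈ (U.foldl (fun st p =>
        if PySem.Str.startswith p.1 c && !(PySem.Set.contains st.2 p.1) then
          (st.1 + pv_primary p.2, PySem.Set.add st.2 p.1)
        else st) (acc, S)).2
    ↔ x ∈ S ∨ (x ∈ U.map Prod.fst ∧ PySem.Str.startswith x c = true) := by
  induction U generalizing acc S with
  | nil => simp
  | cons p rest ih =>
    simp only [List.foldl_cons]
    by_cases h : (PySem.Str.startswith p.1 c && !(PySem.Set.contains S p.1)) = true
    · rw [if_pos h]
      rw [ih]
      simp only [Bool.and_eq_true, Bool.not_eq_true'] at h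
      simp only [PySem.Set.mem_add, List.map_cons, List.mem_cons]
      constructor
      · rintro ((hS | rfl) | hr)
        · exact Or.inl hS
        · exact Or.inr ⟨Or.inl rfl, h.1⟩
        · exact Or.inr ⟨Or.inr hr.1, hr.2⟩
      · rintro (hS | ⟨(rfl | hr), hsw⟩)
        · exact Or.inl (Or.inl hS)
        · exact Or.inl (Or.inr rfl)
        · exact Or.inr ⟨hr, hsw⟩
    · rw [if_neg h]
      rw [ih]
      simp only [Bool.and_eq_true, Bool.not_eq_true', not_and, Bool.not_eq_false] at h
      simp only [List.map_cons, List.mem_cons]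
      constructor
      · rintro (hS | hr)
        · exact Or.inl hS
        · exact Or.inr ⟨Or.inr hr.1, hr.2⟩
      · rintro (hS | ⟨(rfl | hr), hsw⟩)
        · exact Or.inl hS
        · exact Or.inl ((PySem.Set.contains_iff S _).mp (h hsw))
        · exact Or.inr ⟨hr, hsw⟩

-- running total added by one inner pass of A's scenario (b) (needs Nodup usage keys)
lemma innerA_fst (c : String) (U : List (String × List (String × Int)))
    (hnd : (U.map Prod.fst).Nodup) (acc : Int) (S : PySem.Set String) :
    (U.foldl (fun st p =>
        if PySem.Str.startswith p.1 c && !(PySem.Set.contains st.2 p.1) then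
          (st.1 + pv_primary p.2, PySem.Set.add st.2 p.1)
        else st) (acc, S)).1
    = acc + ((U.filter (fun p => PySem.Str.startswith p.1 c && !(PySem.Set.contains S p.1))).map
                (fun p => pv_primary p.2)).sum := by
  induction U generalizing acc S with
  | nil => simp
  | cons p rest ih =>
    simp only [List.map_cons, List.nodup_cons] at hnd
    have hfilter : rest.filter (fun q => PySem.Str.startswith q.1 c && !(PySem.Set.contains (PySem.Set.add S p.1) q.1))
        = rest.filter (fun q => PySem.Str.startswith q.1 c && !(PySem.Set.contains S q.1)) := by
      apply List.filter_congr
      intro q hq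
      have hne : q.1 ≠ p.1 := by
        intro he
        exact hnd.1 (he ▸ List.mem_map_of_mem hq)
      have : PySem.Set.contains (PySem.Set.add S p.1) q.1 = PySem.Set.contains S q.1 := by
        rw [Bool.eq_iff_iff, PySem.Set.contains_iff, PySem.Set.contains_iff, PySem.Set.mem_add]
        simp [hne]
      rw [this]
    simp only [List.foldl_cons]
    by_cases h : (PySem.Str.startswith p.1 c && !(PySem.Set.contains S p.1)) = true
    · rw [if_pos h, ih hnd.2, hfilter, List.filter_cons]
      simp only [h, if_true, List.map_cons, List.sum_cons]
      ring
    · have h' : (PySem.Str.startswith p.1 c && !(PySem.Set.contains S p.1)) = false := by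
        simpa using h
      rw [if_neg h, ih hnd.2, List.filter_cons, h']
      simp

-- splitting one sum over "matches c or a later code" into the two disjoint parts A accumulates
lemma sum_filter_split {α : Type} (l : List α) (f : α → Int) (a b s : α → Bool) :
    ((l.filter (fun x => a x && !s x)).map f).sum
      + ((l.filter (fun x => b x && !s x && !a x)).map f).sum
    = ((l.filter (fun x => (a x || b x) && !s x)).map f).sum := by
  induction l with
  | nil => simp
  | cons x t ih =>
    simp only [List.filter_cons]
    cases ha : a x <;> cases hb : b x <;> cases hs : s x <;>
      simp [ha, hb, hs] <;> omega

-- A's whole scenario-(b) double loop is the sum over usage codes that have a codelist prefix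
lemma outerA (cs : List String) (U : List (String × List (String × Int)))
    (hnd : (U.map Prod.fst).Nodup) (acc : Int) (S : PySem.Set String) :
    (cs.foldl (fun st c =>
        U.foldl (fun st p =>
          if PySem.Str.startswith p.1 c && !(PySem.Set.contains st.2 p.1) then
            (st.1 + pv_primary p.2, PySem.Set.add st.2 p.1)
          else st) st) (acc, S)).1
    = acc + ((U.filter (fun p => pvHasPrefix cs p.1 && !(PySem.Set.contains S p.1))).map
              (fun p => pv_primary p.2)).sum := by
  induction cs generalizing acc S with
  | nil => simp [pvHasPrefix]
  | cons c cs' ih =>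
    simp only [List.foldl_cons]
    set T := U.foldl (fun st p =>
        if PySem.Str.startswith p.1 c && !(PySem.Set.contains st.2 p.1) then
          (st.1 + pv_primary p.2, PySem.Set.add st.2 p.1)
        else st) (acc, S) with hT
    have hTpair : T = (T.1, T.2) := rfl
    rw [hTpair, ih T.1 T.2]
    rw [hT, innerA_fst c U hnd acc S]
    have hcongr : U.filter (fun p => pvHasPrefix cs' p.1 && !(PySem.Set.contains T.2 p.1))
        = U.filter (fun p => pvHasPrefix cs' p.1 && !(PySem.Set.contains S p.1) && !(PySem.Str.startswith p.1 c)) := by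
      apply List.filter_congr
      intro q hq
      have hmem : PySem.Set.contains T.2 q.1
          = (PySem.Set.contains S q.1 || PySem.Str.startswith q.1 c) := by
        rw [Bool.eq_iff_iff, PySem.Set.contains_iff, hT, innerA_mem]
        simp only [Bool.or_eq_true, PySem.Set.contains_iff]
        constructor
        · rintro (h | ⟨_, h⟩)
          · exact Or.inl h
          · exact Or.inr h
        · rintro (h | h)
          · exact Or.inl h
          · exact Or.inr ⟨List.mem_map_of_mem hq, h⟩
      rw [hmem]
      cases PySem.Set.contains S q.1 <;> cases PySem.Str.startswith q.1 c <;> simp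
    rw [hcongr]
    have hsplit := sum_filter_split U (fun p => pv_primary p.2)
      (fun p => PySem.Str.startswith p.1 c) (fun p => pvHasPrefix cs' p.1)
      (fun p => PySem.Set.contains S p.1)
    have hp : ∀ p : String × List (String × Int),
        pvHasPrefix (c :: cs') p.1 = (PySem.Str.startswith p.1 c || pvHasPrefix cs' p.1) := by
      intro p; simp [pvHasPrefix]
    simp only [hp]
    omega

-- a sum over a filtered list written as a sum of if-then-else terms
lemma sum_filter_eq_sum_ite {α : Type} (l : List α) (q : α → Bool) (f : α → Int) :
    ((l.filter q).map f).sum = (l.map (fun x => if q x then f x else 0)).sum := by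
  induction l with
  | nil => rfl
  | cons x t ih => cases h : q x <;> simp [h, ih]

-- ===== VERDICT (by name: the statement is the Claim_ definition above) =====
theorem calculate_usage_scenarios_spec : Claim_equal_calculate_usage_scenarios := by
  intro U cs _hdom hpre
  obtain ⟨hnd, _hinner⟩ := hpre
  unfold Spec_calculate_usage_scenarios calculate_usage_scenarios calculate_usage_scenarios_alt
  by_cases hcs : cs = []
  · simp [hcs]
  · simp only [if_neg hcs]
    -- B's counts dict, rewritten as the mapped dict
    have hcounts : (U.foldl (fun d p => d.insert p.1 (pv_primary p.2)) PySem.Dict.empty)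
        = PySem.Dict.mk (U.map (fun p => (p.1, pv_primary p.2))) := by
      apply PySem.Dict.ext
      rw [counts_items U hnd]
    have hget : ∀ c, (U.foldl (fun d p => d.insert p.1 (pv_primary p.2)) PySem.Dict.empty).get? c
        = ((PySem.Dict.mk U).get? c).map pv_primary := by
      intro c; rw [hcounts, get?_mk_map]
    -- pointwise: B's counts lookup = A's nested lookup
    have hlook : ∀ c, (U.foldl (fun d p => d.insert p.1 (pv_primary p.2)) PySem.Dict.empty).getD c 0
        = pv_primary (((PySem.Dict.mk U).get? c).getD []) := by
      intro c
      show ((U.foldl (fun d p => d.insert p.1 (pv_primary p.2)) PySem.Dict.empty).get? c).getD 0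
        = pv_primary (((PySem.Dict.mk U).get? c).getD [])
      rw [hget c]
      cases (PySem.Dict.mk U).get? c <;> rfl
    have hcont : ∀ c, (U.foldl (fun d p => d.insert p.1 (pv_primary p.2)) PySem.Dict.empty).contains c
        = (PySem.Dict.mk U).contains c := by
      intro c
      rw [PySem.Dict.contains_eq_isSome_get?, PySem.Dict.contains_eq_isSome_get?, hget c]
      cases (PySem.Dict.mk U).get? c <;> rfl
    -- exact_match components agree
    have hexact : (cs.map (fun c =>
          (U.foldl (fun d p => d.insert p.1 (pv_primary p.2)) PySem.Dict.empty).getD c 0)).sum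
        = (cs.map (fun code => pv_primary (((PySem.Dict.mk U).get? code).getD []))).sum := by
      congr 1
      exact List.map_congr_left (fun c _ => hlook c)
    -- with_prefix components agree
    have hwp : (cs.foldl (fun st c =>
          (PySem.Dict.mk U).items.foldl (fun st p =>
            if PySem.Str.startswith p.1 c && !(PySem.Set.contains st.2 p.1) then
              (st.1 + pv_primary p.2, PySem.Set.add st.2 p.1)
            else st) st) ((0 : Int), (PySem.Set.empty : PySem.Set String))).1
        = (U.foldl (fun d p => d.insert p.1 (pv_primary p.2)) PySem.Dict.empty).items.foldl
            (fun acc p =>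
              if (PySem.List.pyRange 0 (PySem.Str.len p.1 + 1) 1).any
                   (fun i => PySem.Set.contains (PySem.Set.ofList cs) (PySem.Str.slice p.1 none (some i)))
              then acc + p.2 else acc) (0 : Int) := by
      rw [counts_items U hnd]
      have hA := outerA cs U hnd 0 PySem.Set.empty
      have hSempty : ∀ p : String × List (String × Int),
          (pvHasPrefix cs p.1 && !(PySem.Set.contains (PySem.Set.empty : PySem.Set String) p.1))
            = pvHasPrefix cs p.1 := by
        intro p; cases pvHasPrefix cs p.1 <;> rfl
      simp only [hSempty] at hA
      rw [hA]
      -- B's side: rewrite the loop body, then fold to a sum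
      have hbody : ∀ (acc : Int) (p : String × Int), p ∈ U.map (fun p => (p.1, pv_primary p.2)) →
          (if (PySem.List.pyRange 0 (PySem.Str.len p.1 + 1) 1).any
               (fun i => PySem.Set.contains (PySem.Set.ofList cs) (PySem.Str.slice p.1 none (some i)))
           then acc + p.2 else acc)
          = acc + (if pvHasPrefix cs p.1 then p.2 else 0) := by
        intro acc p _
        rw [anyPrefix_eq cs p.1]
        cases pvHasPrefix cs p.1 <;> simp
      rw [PySem.List.foldl_congr_mem _ _ _ _ hbody, PySem.List.foldl_add]
      rw [sum_filter_eq_sum_ite]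
      simp [List.map_map, Function.comp_def]
    -- with_x_padding components agree
    have hwx : (cs.foldl (fun acc c =>
          let x_code := if !(PySem.Str.endswith c "X") then pvAddX c else c
          if (PySem.Dict.mk U).contains x_code then
            acc + pv_primary (((PySem.Dict.mk U).get? x_code).getD [])
          else acc)
        ((cs.map (fun code => pv_primary (((PySem.Dict.mk U).get? code).getD []))).sum))
        = (cs.foldl (fun acc c =>
          let x_code := if PySem.Str.endswith c "X" then c else pvAddX c
          if (U.foldl (fun d p => d.insert p.1 (pv_primary p.2)) PySem.Dict.empty).contains x_code then
            acc + (U.foldl (fun d p => d.insert p.1 (pv_primary p.2)) PySem.Dict.empty).getD x_code 0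
          else acc)
        ((cs.map (fun c =>
          (U.foldl (fun d p => d.insert p.1 (pv_primary p.2)) PySem.Dict.empty).getD c 0)).sum)) := by
      rw [hexact]
      apply PySem.List.foldl_congr_mem
      intro acc c _
      have hx : (if !(PySem.Str.endswith c "X") then pvAddX c else c)
          = (if PySem.Str.endswith c "X" then c else pvAddX c) := by
        cases PySem.Str.endswith c "X" <;> rfl
      simp only [hx, hcont, hlook]
    exact Prod.ext (hexact.symm) (Prod.ext hwp hwx)
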